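-- pv_equiv track=rewrite | github.com/FABULOUSSAM/shubham_mohape_scraping_assignment | traderjoes/Validation.py | validate_duplicate_images
-- ===== SOURCE A (Python) =====
-- def validate_duplicate_images(product_data):
--     """
--     Validate for duplicate images within the 'images' list.
--     """
--     images = product_data.get('images')
--     if images:
--         unique_images = set()
--         for image_url in images:
--             if image_url in unique_images:
--                 return False, f"Duplicate image URL: {image_url}"
--             else:
--                 unique_images.add(image_url)
--     return True, ""
-- ===== SOURCE B (Python) =====
-- def validate_duplicate_images(product_data):
--     """
--     Validate for duplicate images within the 'images' list.
--     """
--     images = product_data.get('images')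
--     if images:
--         firsts = {}
--         for i, url in enumerate(images):
--             if url not in firsts:
--                 firsts[url] = i
--         for i, url in enumerate(images):
--             if firsts[url] != i:
--                 return False, f"Duplicate image URL: {url}"
--     return True, ""
-- ===== Notes on version B (the rewrite author's own statement) =====
-- stated objective: alternative
-- what changed: B replaces A's single early-exit scan that maintains a growing 'seen' set by two staged passes: the first builds a dict mapping each URL to the index of its first occurrence, the second reports the first position whose stored first index differs from its own index.
import Mathlib
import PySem

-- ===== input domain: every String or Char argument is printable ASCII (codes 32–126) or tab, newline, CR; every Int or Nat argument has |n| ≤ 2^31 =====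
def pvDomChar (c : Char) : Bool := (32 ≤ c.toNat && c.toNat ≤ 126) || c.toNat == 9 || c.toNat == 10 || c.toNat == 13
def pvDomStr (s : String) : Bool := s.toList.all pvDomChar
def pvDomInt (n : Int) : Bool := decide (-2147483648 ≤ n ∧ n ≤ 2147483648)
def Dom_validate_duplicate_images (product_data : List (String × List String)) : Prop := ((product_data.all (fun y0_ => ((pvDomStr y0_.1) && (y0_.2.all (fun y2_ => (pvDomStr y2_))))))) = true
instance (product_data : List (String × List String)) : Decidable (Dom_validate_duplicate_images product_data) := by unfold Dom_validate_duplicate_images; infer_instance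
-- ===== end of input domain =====

-- B replaces A's early-exit scan with a maintained 'seen' set by two staged passes: build a first-occurrence-index dict, then report the first position whose stored first index differs (alternative decomposition, same cost class).


-- ===== PORT A =====
-- A: one scan maintaining a 'seen' set; first URL already in the set is reported.
def vdLoopA : List String → PySem.Set String → Bool × String
  | [], _ => (true, "")
  | u :: rest, seen =>
    if PySem.Set.contains seen u then (false, "Duplicate image URL: " ++ u)
    else vdLoopA rest (PySem.Set.add seen u)

def validate_duplicate_images (product_data : List (String × List String)) : Bool × String :=
  -- product_data.get('images'): first-match lookup in the association list (exact for Python dicts, whose keys are unique)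
  match (product_data.find? (fun p => p.1 == "images")).map (·.2) with
  | some images => if images ≠ [] then vdLoopA images PySem.Set.empty else (true, "")
  | none => (true, "")

-- ===== PORT B =====
-- B pass 1: 'if url not in firsts: firsts[url] = i' over enumerate(images)
def vdFirsts : List (Int × String) → PySem.Dict String Int → PySem.Dict String Int
  | [], d => d
  | (i, u) :: rest, d => vdFirsts rest (if d.contains u then d else d.insert u i)

-- B pass 2: 'if firsts[url] != i: return False, …'; every url is a key of firsts,
-- so the always-succeeding lookup firsts[url] != i is exactly get? url ≠ some i.
def vdLocate (firsts : PySem.Dict String Int) : List (Int × String) → Bool × String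
  | [] => (true, "")
  | (i, u) :: rest =>
    if firsts.get? u ≠ some i then (false, "Duplicate image URL: " ++ u)
    else vdLocate firsts rest

def validate_duplicate_images_alt (product_data : List (String × List String)) : Bool × String :=
  -- product_data.get('images'): first-match lookup in the association list (exact for Python dicts, whose keys are unique)
  match (product_data.find? (fun p => p.1 == "images")).map (·.2) with
  | some images =>
    if images ≠ [] then
      vdLocate (vdFirsts (PySem.List.enumerate images 0) PySem.Dict.empty)
        (PySem.List.enumerate images 0)
    else (true, "")
  | none => (true, "")

-- ===== PRECONDITION & SPEC =====
def Spec_validate_duplicate_images (product_data : List (String × List String)) (out : Bool × String) : Prop := out = validate_duplicate_images_alt product_data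
instance (product_data : List (String × List String)) (out : Bool × String) : Decidable (Spec_validate_duplicate_images product_data out) := by unfold Spec_validate_duplicate_images; infer_instance

-- ===== CLAIM (what is proved, stated in full; the proofs are below) =====
def Claim_equal_validate_duplicate_images : Prop := ∀ (product_data : List (String × List String)), Dom_validate_duplicate_images product_data → Spec_validate_duplicate_images product_data (validate_duplicate_images product_data)

-- ===== LEMMAS AND PROOFS =====

-- pass 1 computes first-occurrence indices
lemma vdFirsts_get (u : String) : ∀ (l : List String) (s : Int) (d : PySem.Dict String Int),
    (vdFirsts (PySem.List.enumerate l s) d).get? u =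
      match d.get? u with
      | some v => some v
      | none => if u ∈ l then some (s + (l.idxOf u : Int)) else none := by
  intro l
  induction l with
  | nil => intro s d; cases h : d.get? u <;> simp [PySem.List.enumerate_nil, vdFirsts, h]
  | cons x t ih =>
    intro s d
    rw [PySem.List.enumerate_cons]
    show (vdFirsts (PySem.List.enumerate t (s+1)) (if d.contains x then d else d.insert x s)).get? u = _
    by_cases hc : d.contains x = true
    · rw [if_pos hc, ih]
      cases hd : d.get? u with
      | some v => rfl
      | none =>
        by_cases hxu : u = x
        · subst hxu
          rw [PySem.Dict.contains_eq_isSome_get?, hd] at hc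
          simp at hc
        · simp only [List.mem_cons, hxu, false_or]
          by_cases ht : u ∈ t
          · simp only [ht, if_true, List.idxOf_cons_ne _ (by simpa using (Ne.symm hxu))]
            congr 1
            push_cast
            ring
          · simp [ht]
    · simp only [hc]
      rw [if_neg (by simp), ih]
      by_cases hxu : u = x
      · subst hxu
        rw [PySem.Dict.get?_insert_self]
        rw [PySem.Dict.contains_eq_isSome_get?] at hc
        cases hd : d.get? u with
        | some v => rw [hd] at hc; simp at hc
        | none => simp [List.idxOf_cons_self]
      · rw [PySem.Dict.get?_insert_of_ne _ _ hxu]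
        cases hd : d.get? u with
        | some v => rfl
        | none =>
          simp only [List.mem_cons, hxu, false_or]
          by_cases ht : u ∈ t
          · simp only [ht, if_true, List.idxOf_cons_ne _ (by simpa using (Ne.symm hxu))]
            congr 1
            push_cast
            ring
          · simp [ht]

-- pass 2 agrees with A's seen-set scan, prefix by prefix
lemma vdLocate_eq (l : List String) : ∀ (rest pre : List String), l = pre ++ rest →
    vdLoopA rest (PySem.Set.ofList pre)
      = vdLocate (vdFirsts (PySem.List.enumerate l 0) PySem.Dict.empty)
          (PySem.List.enumerate rest (pre.length : Int)) := by
  intro rest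
  induction rest with
  | nil => intro pre _; simp [vdLoopA, vdLocate, PySem.List.enumerate_nil]
  | cons u rest ih =>
    intro pre hl
    rw [PySem.List.enumerate_cons]
    show vdLoopA (u :: rest) (PySem.Set.ofList pre) = _
    rw [vdLoopA, vdLocate]
    have hget : (vdFirsts (PySem.List.enumerate l 0) PySem.Dict.empty).get? u
        = some ((l.idxOf u : Nat) : Int) := by
      rw [vdFirsts_get]
      have hu : u ∈ l := by rw [hl]; simp
      simp [PySem.Dict.get?_empty, hu]
    by_cases hmem : u ∈ pre
    · -- duplicate: first occurrence strictly inside pre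
      have hlt : l.idxOf u < pre.length := by
        rw [hl, List.idxOf_append_of_mem hmem]
        exact List.idxOf_lt_length_of_mem hmem
      have hne : (vdFirsts (PySem.List.enumerate l 0) PySem.Dict.empty).get? u
          ≠ some (pre.length : Int) := by
        rw [hget]; intro h
        have : (l.idxOf u : Int) = (pre.length : Int) := by simpa using h
        omega
      simp [hmem, hne]
    · -- fresh: first occurrence is exactly this position
      have hidx : l.idxOf u = pre.length := by
        rw [hl, List.idxOf_append_of_notMem hmem]
        simp
      have heq : (vdFirsts (PySem.List.enumerate l 0) PySem.Dict.empty).get? u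
          = some (pre.length : Int) := by rw [hget, hidx]
      have hA : PySem.Set.contains (PySem.Set.ofList pre) u = false := by simp [hmem]
      rw [hA]
      simp only [Bool.false_eq_true, if_false, heq, ne_eq, not_true_eq_false, if_false]
      have h2 := ih (pre ++ [u]) (by simpa using hl)
      have hset : PySem.Set.ofList (pre ++ [u]) = PySem.Set.add (PySem.Set.ofList pre) u := by
        simp [PySem.Set.ofList_eq_foldl, List.foldl_append]
      rw [hset] at h2
      have e2 : (((pre ++ [u]).length : Nat) : Int) = (pre.length : Int) + 1 := by simp
      rw [e2] at h2
      exact h2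

-- ===== VERDICT (by name: the statement is the Claim_ definition above) =====
theorem validate_duplicate_images_spec : Claim_equal_validate_duplicate_images := by
  intro pd _
  unfold Spec_validate_duplicate_images validate_duplicate_images validate_duplicate_images_alt
  cases h : (pd.find? (fun p => p.1 == "images")).map (·.2) with
  | none => rfl
  | some images =>
    by_cases hne : images = []
    · simp [hne]
    · simp only [hne, ne_eq, not_false_iff, if_true]
      have := vdLocate_eq images images [] rfl
      simpa using this
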